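/- GENERATED by farm/mkstatement.py from design/units.tsv (unit `range_bad`) and the Specs of Vorbis/Spec/*.lean — do not edit.
   THE STATEMENT of the proof unit `range_bad`: the function `range_bad` (32 instructions) satisfies its contract,
   given the contracts of its callees. What the names mean: Vorbis/Spec/Basic.lean. The theorem to prove:
   `theorem range_bad_ok : Vorbis.Spec.range_bad.Statement`. -/
import Vorbis.Spec.Runtime
namespace Vorbis.Spec.range_bad
open X86 X86.User Asan

/-- The statement of unit `range_bad`. -/
def Statement : Prop :=
  ∀ (Lay : Layout) (_hLay : Lay.hi = 0x1000000) (μ : Microarch) (_hμ : UserX.MicroOK μ) (u₀ : State)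
    (_hcode : HasCodeNat Lay u₀ Vorbis.L.range_bad.entry Vorbis.Code.code_range_bad.nat Vorbis.L.range_bad.size),
    Calls Lay μ Vorbis.WayInv (Vorbis.conv u₀) Vorbis.L.range_bad.entry Asan.rangeBadSpec

end Vorbis.Spec.range_bad
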